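-- pv_equiv track=rewrite | github.com/shantanu2311/instagram-saas | backend/app/instagram/publisher.py | format_caption
-- ===== SOURCE A (Python) =====
-- def format_caption(caption: str, hashtags: list[str], brand_hashtag: str = "") -> str:
--     """Format caption with hashtags. Instagram max is 2200 chars, 30 hashtags."""
--     parts: list[str] = [caption.strip()]
--
--     # Build hashtag block
--     tag_parts: list[str] = []
--     if brand_hashtag:
--         tag = brand_hashtag if brand_hashtag.startswith("#") else f"#{brand_hashtag}"
--         tag_parts.append(tag)
--     for ht in hashtags:
--         tag = ht if ht.startswith("#") else f"#{ht}"
--         tag_parts.append(tag)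
--
--     if tag_parts:
--         # Separate caption from hashtags with dot separators
--         parts.append(".\n.\n.")
--         parts.append(" ".join(tag_parts))
--
--     result = "\n".join(parts)
--
--     # Enforce Instagram limits
--     if len(result) > 2200:
--         # Trim hashtags from the end until we fit
--         while len(result) > 2200 and tag_parts:
--             tag_parts.pop()
--             hashtag_block = " ".join(tag_parts)
--             result = f"{caption.strip()}\n.\n.\n.\n{hashtag_block}" if tag_parts else caption.strip()
--
--     return result
-- ===== SOURCE B (Python) =====
-- def format_caption(caption: str, hashtags: list[str], brand_hashtag: str = "") -> str:
--     """Single forward pass with a running length: keep the longest prefix of the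
--     hashtag list that fits in 2200 chars, then join once."""
--     cap = caption.strip()
--
--     def _tag(t: str) -> str:
--         return t if t.startswith("#") else "#" + t
--
--     tags = ([_tag(brand_hashtag)] if brand_hashtag else []) + [_tag(ht) for ht in hashtags]
--
--     kept: list[str] = []
--     total = len(cap) + 7  # overhead of "\n.\n.\n.\n" once any tag is kept
--     for t in tags:
--         extra = len(t) if not kept else len(t) + 1
--         if total + extra > 2200:
--             break
--         kept.append(t)
--         total += extra
--
--     if not kept:
--         return cap
--     return f"{cap}\n.\n.\n.\n{' '.join(kept)}"
-- ===== Notes on version B (the rewrite author's own statement) =====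
-- stated objective: faster
-- what changed: A builds the full caption, then trims by popping one hashtag at a time and re-joining the whole hashtag block after every pop; B makes a single forward pass keeping a running length to select the longest fitting hashtag prefix and joins once.
import Mathlib
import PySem

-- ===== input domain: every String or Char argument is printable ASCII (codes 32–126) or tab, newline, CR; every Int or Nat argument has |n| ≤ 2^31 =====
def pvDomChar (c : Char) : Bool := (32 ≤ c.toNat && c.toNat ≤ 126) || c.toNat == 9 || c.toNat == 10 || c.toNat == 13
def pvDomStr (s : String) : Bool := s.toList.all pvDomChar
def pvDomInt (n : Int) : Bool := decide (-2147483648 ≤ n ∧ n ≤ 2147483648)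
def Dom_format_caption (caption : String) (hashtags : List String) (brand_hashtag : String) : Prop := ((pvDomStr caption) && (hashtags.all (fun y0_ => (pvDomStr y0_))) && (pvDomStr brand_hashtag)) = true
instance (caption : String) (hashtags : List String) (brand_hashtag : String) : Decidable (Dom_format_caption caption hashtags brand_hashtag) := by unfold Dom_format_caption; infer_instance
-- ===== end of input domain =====

-- B replaces A's pop-one-tag-and-rejoin-everything trimming loop by one forward pass with a
-- running length, joining once at the end; same return value on every input.

-- ===== PORT A =====
-- the 'while len(result) > 2200 and tag_parts:' loop of A, popping the last tag each round
def formatCaptionTrim (caption : String) (tag_parts : List String) (result : String) : String :=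
  if h : PySem.Str.len result > 2200 ∧ tag_parts ≠ [] then
    let tp := tag_parts.dropLast
    let hashtag_block := PySem.Str.join " " tp
    let result' := if tp ≠ [] then PySem.Str.strip caption ++ "\n.\n.\n.\n" ++ hashtag_block
                   else PySem.Str.strip caption
    formatCaptionTrim caption tp result'
  else result
termination_by tag_parts.length
decreasing_by
  have : tag_parts.length ≠ 0 := fun h0 => h.2 (List.eq_nil_of_length_eq_zero h0)
  simp only [List.length_dropLast]; omega

def format_caption (caption : String) (hashtags : List String) (brand_hashtag : String) : String :=
  let parts : List String := [PySem.Str.strip caption]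
  let tag_parts : List String :=
    if brand_hashtag ≠ "" then
      [if PySem.Str.startswith brand_hashtag "#" then brand_hashtag else "#" ++ brand_hashtag]
    else []
  let tag_parts := hashtags.foldl
    (fun acc ht => acc ++ [if PySem.Str.startswith ht "#" then ht else "#" ++ ht]) tag_parts
  let parts := if tag_parts ≠ [] then parts ++ [".\n.\n.", PySem.Str.join " " tag_parts] else parts
  let result := PySem.Str.join "\n" parts
  if PySem.Str.len result > 2200 then formatCaptionTrim caption tag_parts result else result

-- ===== PORT B =====
def fcAltTag (t : String) : String :=
  if PySem.Str.startswith t "#" then t else "#" ++ t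

-- Source B's single forward pass: keep tags while the running total stays within 2200
def fcAltLoop (tags kept : List String) (total : Int) : List String :=
  match tags with
  | [] => kept
  | t :: rest =>
    let extra := if kept = [] then PySem.Str.len t else PySem.Str.len t + 1
    if total + extra > 2200 then kept
    else fcAltLoop rest (kept ++ [t]) (total + extra)

def format_caption_alt (caption : String) (hashtags : List String) (brand_hashtag : String) : String :=
  let cap := PySem.Str.strip caption
  let tags := (if brand_hashtag ≠ "" then [fcAltTag brand_hashtag] else []) ++ hashtags.map fcAltTag
  let kept := fcAltLoop tags [] (PySem.Str.len cap + 7)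
  if kept = [] then cap
  else cap ++ "\n.\n.\n.\n" ++ PySem.Str.join " " kept

-- ===== PRECONDITION & SPEC =====
def Spec_format_caption (caption : String) (hashtags : List String) (brand_hashtag : String) (out : String) : Prop := out = format_caption_alt caption hashtags brand_hashtag
instance (caption : String) (hashtags : List String) (brand_hashtag : String) (out : String) : Decidable (Spec_format_caption caption hashtags brand_hashtag out) := by unfold Spec_format_caption; infer_instance

-- ===== CLAIM (what is proved, stated in full; the proofs are below) =====
def Claim_equal_format_caption : Prop := ∀ (caption : String) (hashtags : List String) (brand_hashtag : String), Dom_format_caption caption hashtags brand_hashtag → Spec_format_caption caption hashtags brand_hashtag (format_caption caption hashtags brand_hashtag)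

-- ===== LEMMAS AND PROOFS =====

-- the string both programs produce when the kept tag list is ts
def fcFmt (cap : String) (ts : List String) : String :=
  if ts = [] then cap else cap ++ "\n.\n.\n.\n" ++ PySem.Str.join " " ts

-- weight of a tag list: each tag costs its length plus one separator
def fcW (ts : List String) : Int := (ts.map (fun t => PySem.Str.len t + 1)).sum

-- total length of the formatted string when the kept tag list is ts
def fcS (cap : String) (ts : List String) : Int :=
  if ts = [] then PySem.Str.len cap else PySem.Str.len cap + 6 + fcW ts

lemma fcW_append (xs : List String) (t : String) :
    fcW (xs ++ [t]) = fcW xs + (PySem.Str.len t + 1) := by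
  simp [fcW]

lemma fc_len_nonneg (t : String) : 0 ≤ PySem.Str.len t := by
  simp [PySem.Str.len_eq]

lemma fc_join_len : ∀ (ts : List String) (t : String),
    PySem.Str.len (PySem.Str.join " " (t :: ts)) = fcW (t :: ts) - 1 := by
  intro ts
  induction ts with
  | nil =>
    intro t
    simp [PySem.Str.len_eq, PySem.Str.toList_join, PySem.Chars.join_singleton, fcW]
  | cons q rest ih =>
    intro t
    have h1 : (PySem.Str.join " " (t :: q :: rest)).toList
        = t.toList ++ " ".toList ++ (PySem.Str.join " " (q :: rest)).toList := by
      simp [PySem.Str.toList_join, PySem.Chars.join_cons_cons]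
    have h2 := ih q
    have h3 : fcW (t :: q :: rest) = PySem.Str.len t + 1 + fcW (q :: rest) := by
      simp [fcW]
    rw [PySem.Str.len_eq, h1]
    rw [PySem.Str.len_eq] at h2
    rw [PySem.Str.len_eq] at h3
    have e : (" ".toList).length = 1 := rfl
    simp only [List.length_append, e]
    push_cast at h2 h3 ⊢
    omega

lemma fc_len_fmt (cap : String) (ts : List String) :
    PySem.Str.len (fcFmt cap ts) = fcS cap ts := by
  cases ts with
  | nil => simp [fcFmt, fcS]
  | cons t rest =>
    have h7 : PySem.Str.len "\n.\n.\n.\n" = 7 := by decide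
    rw [fcFmt, fcS, if_neg (by simp), if_neg (by simp), PySem.Str.len_append,
      PySem.Str.len_append, h7, fc_join_len]
    omega

-- "\n".join(parts) written as a plain concatenation, in both shapes A builds
lemma fc_join_one (cap : String) : PySem.Str.join "\n" [cap] = cap := by
  apply String.toList_inj.mp
  simp [PySem.Str.toList_join, PySem.Chars.join_singleton]

lemma fc_join_three (cap b : String) :
    PySem.Str.join "\n" [cap, ".\n.\n.", b] = cap ++ "\n.\n.\n.\n" ++ b := by
  apply String.toList_inj.mp
  have e1 : "\n".toList = ['\n'] := rfl
  have e2 : ".\n.\n.".toList = ['.','\n','.','\n','.'] := rfl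
  have e3 : "\n.\n.\n.\n".toList = ['\n','.','\n','.','\n','.','\n'] := rfl
  simp [PySem.Str.toList_join, PySem.Chars.join_cons_cons, PySem.Chars.join_singleton,
    String.toList_append, e1, e2, e3]

lemma fc_joinparts (cap : String) (tags : List String) :
    PySem.Str.join "\n" (if tags ≠ [] then [cap] ++ [".\n.\n.", PySem.Str.join " " tags] else [cap])
      = fcFmt cap tags := by
  by_cases h : tags = []
  · simp [h, fcFmt, fc_join_one]
  · simp only [h, ne_eq, not_false_iff, if_pos, List.cons_append, List.nil_append]
    rw [fc_join_three, fcFmt, if_neg h]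

lemma fcS_take_succ (cap : String) (ts : List String) (n : Nat) :
    fcS cap (ts.take n) ≤ fcS cap (ts.take (n + 1)) := by
  by_cases hn : n < ts.length
  · have ht : ts.take (n + 1) = ts.take n ++ [ts[n]] := by
      rw [List.take_add_one, List.getElem?_eq_getElem hn]; rfl
    by_cases hnil : ts.take n = []
    · rw [ht, hnil]
      have := fc_len_nonneg ts[n]
      simp [fcS, fcW]
      omega
    · have hnil' : ts.take n ++ [ts[n]] ≠ [] :=
        fun h => by have := congrArg List.length h; simp at this; exact hnil (by simp [this])
      rw [ht]
      simp only [fcS, if_neg hnil, if_neg hnil', fcW_append]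
      have := fc_len_nonneg ts[n]
      omega
  · rw [List.take_of_length_le (by omega), List.take_of_length_le (by omega)]

lemma fcS_take_mono (cap : String) (ts : List String) {i j : Nat} (hij : i ≤ j) :
    fcS cap (ts.take i) ≤ fcS cap (ts.take j) := by
  induction j, hij using Nat.le_induction with
  | base => exact le_refl _
  | succ j hij ih => exact le_trans ih (fcS_take_succ cap ts j)

lemma fcS_snoc (cap : String) (kept : List String) (t : String) (total : Int)
    (h1 : kept = [] → total = PySem.Str.len cap + 7)
    (h2 : kept ≠ [] → total = fcS cap kept) :
    fcS cap (kept ++ [t]) = total + (if kept = [] then PySem.Str.len t else PySem.Str.len t + 1) := by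
  by_cases hk : kept = []
  · subst hk
    simp [fcS, fcW, h1 rfl]
    omega
  · have hne : kept ++ [t] ≠ [] := fun h => by have := congrArg List.length h; simp at this
    rw [fcS, if_neg hne, fcW_append, if_neg hk]
    rw [fcS, if_neg hk] at h2
    rw [h2 hk]
    omega

lemma fcAltLoop_spec (cap : String) : ∀ (rest kept : List String) (total : Int),
    (kept = [] → total = PySem.Str.len cap + 7) →
    (kept ≠ [] → total = fcS cap kept) →
    (kept ≠ [] → fcS cap kept ≤ 2200) →
    ∃ m, m ≤ rest.length ∧ fcAltLoop rest kept total = kept ++ rest.take m ∧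
      (kept ++ rest.take m ≠ [] → fcS cap (kept ++ rest.take m) ≤ 2200) ∧
      (m < rest.length → 2200 < fcS cap (kept ++ rest.take (m + 1))) := by
  intro rest
  induction rest with
  | nil =>
    intro kept total h1 h2 h3
    refine ⟨0, by simp, by simp [fcAltLoop], ?_, by simp⟩
    intro hne
    simp only [List.take_nil, List.append_nil] at hne ⊢
    exact h3 hne
  | cons t rest ih =>
    intro kept total h1 h2 h3
    by_cases hgt : total + (if kept = [] then PySem.Str.len t else PySem.Str.len t + 1) > 2200
    · refine ⟨0, by simp, ?_, ?_, ?_⟩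
      · simp only [fcAltLoop, if_pos hgt, List.take_zero, List.append_nil]
      · intro hne
        simp only [List.take_zero, List.append_nil] at hne ⊢
        exact h3 hne
      · intro _
        have : (t :: rest).take 1 = [t] := by simp
        rw [this, fcS_snoc cap kept t total h1 h2]
        omega
    · have heq : fcAltLoop (t :: rest) kept total
          = fcAltLoop rest (kept ++ [t])
              (total + (if kept = [] then PySem.Str.len t else PySem.Str.len t + 1)) := by
        simp only [fcAltLoop, if_neg hgt]
      have hs := fcS_snoc cap kept t total h1 h2
      have hne : kept ++ [t] ≠ [] := fun h => by have := congrArg List.length h; simp at this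
      obtain ⟨m, hm, hloop, hc, hd⟩ := ih (kept ++ [t])
        (total + (if kept = [] then PySem.Str.len t else PySem.Str.len t + 1))
        (fun h => absurd h hne) (fun _ => hs.symm) (fun _ => by omega)
      refine ⟨m + 1, by simpa using hm, ?_, ?_, ?_⟩
      · rw [heq, hloop]
        simp [List.take_succ_cons]
      · intro _
        have hre : kept ++ (t :: rest).take (m + 1) = (kept ++ [t]) ++ rest.take m := by
          simp [List.take_succ_cons]
        rw [hre]
        exact hc (fun h => by have := congrArg List.length h; simp at this)
      · intro hlt
        have hlt' : m < rest.length := by simpa using hlt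
        have hre : kept ++ (t :: rest).take (m + 1 + 1) = (kept ++ [t]) ++ rest.take (m + 1) := by
          simp [List.take_succ_cons]
        rw [hre]
        exact hd hlt'

lemma fcTrim_spec (caption : String) (tags : List String) (m : Nat)
    (hstop : tags.take m ≠ [] → fcS (PySem.Str.strip caption) (tags.take m) ≤ 2200)
    (hbig : ∀ i, m < i → i ≤ tags.length → 2200 < fcS (PySem.Str.strip caption) (tags.take i)) :
    ∀ j, m ≤ j → j ≤ tags.length →
      formatCaptionTrim caption (tags.take j) (fcFmt (PySem.Str.strip caption) (tags.take j))
        = fcFmt (PySem.Str.strip caption) (tags.take m) := by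
  intro j
  induction j with
  | zero =>
    intro hmj _
    have hm0 : m = 0 := Nat.le_zero.mp hmj
    subst hm0
    rw [formatCaptionTrim, dif_neg (by simp)]
  | succ j ih =>
    intro hmj hjn
    have hne : tags.take (j + 1) ≠ [] := by
      intro h
      rw [List.take_eq_nil_iff] at h
      rcases h with h | h
      · omega
      · rw [h] at hjn; simp at hjn
    by_cases hm : m = j + 1
    · subst hm
      rw [formatCaptionTrim, dif_neg]
      rw [fc_len_fmt]
      intro hcond
      exact absurd (hstop hne) (by omega)
    · have hmj' : m ≤ j := by omega
      have hj : j < tags.length := by omega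
      have hgt : 2200 < fcS (PySem.Str.strip caption) (tags.take (j + 1)) :=
        hbig (j + 1) (by omega) hjn
      have hdrop : (tags.take (j + 1)).dropLast = tags.take j := by
        have ht : tags.take (j + 1) = tags.take j ++ [tags[j]] := by
          rw [List.take_add_one, List.getElem?_eq_getElem hj]; rfl
        rw [ht, List.dropLast_concat]
      rw [formatCaptionTrim, dif_pos ⟨by rw [fc_len_fmt]; exact hgt, hne⟩]
      simp only [hdrop]
      have hres : (if tags.take j ≠ [] then
            PySem.Str.strip caption ++ "\n.\n.\n.\n" ++ PySem.Str.join " " (tags.take j)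
          else PySem.Str.strip caption) = fcFmt (PySem.Str.strip caption) (tags.take j) := by
        rw [fcFmt]
        by_cases h0 : tags.take j = [] <;> simp [h0]
      rw [hres]
      exact ih hmj' (by omega)

-- ===== VERDICT (by name: the statement is the Claim_ definition above) =====
theorem format_caption_spec : Claim_equal_format_caption := by
  intro caption hashtags brand_hashtag _
  unfold Spec_format_caption
  simp only [format_caption, format_caption_alt]
  rw [PySem.List.foldl_append_singleton_eq_map]
  have htagf : (fun ht => if PySem.Str.startswith ht "#" then ht else "#" ++ ht) = fcAltTag := by
    funext t; rw [fcAltTag]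
  rw [htagf]
  have hb : (if PySem.Str.startswith brand_hashtag "#" = true then brand_hashtag
      else "#" ++ brand_hashtag) = fcAltTag brand_hashtag := by rw [fcAltTag]
  simp only [hb]
  set cap := PySem.Str.strip caption with hcap
  set tags := (if brand_hashtag ≠ "" then [fcAltTag brand_hashtag] else []) ++ hashtags.map fcAltTag
    with htags
  obtain ⟨m, hm, hloop, hc, hd⟩ :=
    fcAltLoop_spec cap tags [] (PySem.Str.len cap + 7) (fun _ => rfl)
      (fun h => absurd rfl h) (fun h => absurd rfl h)
  simp only [List.nil_append] at hloop hc hd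
  rw [hloop]
  have hB : (if tags.take m = [] then cap
      else cap ++ "\n.\n.\n.\n" ++ PySem.Str.join " " (tags.take m)) = fcFmt cap (tags.take m) := by
    rw [fcFmt]
  rw [hB, fc_joinparts cap tags, fc_len_fmt]
  by_cases hbigall : 2200 < fcS cap tags
  · rw [if_pos hbigall]
    have hstop : tags.take m ≠ [] → fcS cap (tags.take m) ≤ 2200 := hc
    have hbig : ∀ i, m < i → i ≤ tags.length → 2200 < fcS cap (tags.take i) := by
      intro i hi hile
      have hmn : m < tags.length := lt_of_lt_of_le hi hile
      have h1 := hd hmn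
      have h2 := fcS_take_mono cap tags (i := m + 1) (j := i) (by omega)
      omega
    have := fcTrim_spec caption tags m hstop hbig tags.length hm (le_refl _)
    rw [List.take_length] at this
    exact this
  · rw [if_neg hbigall]
    have hmn : m = tags.length := by
      by_contra hne
      have hlt : m < tags.length := lt_of_le_of_ne hm hne
      have h1 := hd hlt
      have h2 := fcS_take_mono cap tags (i := m + 1) (j := tags.length) (by omega)
      rw [List.take_length] at h2
      omega
    rw [hmn, List.take_length]
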